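-- pv_equiv track=rewrite | github.com/HuynhLe-Nicole/B439 | 03_Single-byteXORCipher.py | score_plaintext
-- ===== SOURCE A (Python) =====
-- def score_plaintext(plaintext):
--     # Define a set of common English letters(including space)
--     common_chars = "etaoinshrdlu ETAOINSHRDLU" # Common English characters (lowercase and uppercase)
--
--     score = 0  # Initialize score to 0
--
--     for char in plaintext:
--         if chr(char) in common_chars: # If the character is in the common_chars list, increase th score
--             score += 1
--         elif not chr(char).isprintable():  # Penalize non-printable characters by decreasing the score
--             score -= 10
--
--     return score  # Return the final score
-- ===== SOURCE B (Python) =====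
-- def score_plaintext(plaintext):
--     # Pass 1: frequency histogram of the codes.
--     freq = {}
--     for char in plaintext:
--         freq[char] = freq.get(char, 0) + 1
--     common_chars = "etaoinshrdlu ETAOINSHRDLU"
--     # Pass 2: aggregate over the DISTINCT codes, weighted by their counts.
--     score = 0
--     for code, n in freq.items():
--         if chr(code) in common_chars:
--             score += n
--         elif not chr(code).isprintable():
--             score -= 10 * n
--     return score
-- ===== Notes on version B (the rewrite author's own statement) =====
-- stated objective: alternative
-- what changed: B first builds a frequency histogram of the codes in one pass and then scores each DISTINCT code once, weighted by its count, instead of A's per-element scoring loop; same O(n) cost, different traversal and maintained state.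
-- outside the precondition, e.g. on score_plaintext([300]): A returns 0, B returns 0
import Mathlib
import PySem

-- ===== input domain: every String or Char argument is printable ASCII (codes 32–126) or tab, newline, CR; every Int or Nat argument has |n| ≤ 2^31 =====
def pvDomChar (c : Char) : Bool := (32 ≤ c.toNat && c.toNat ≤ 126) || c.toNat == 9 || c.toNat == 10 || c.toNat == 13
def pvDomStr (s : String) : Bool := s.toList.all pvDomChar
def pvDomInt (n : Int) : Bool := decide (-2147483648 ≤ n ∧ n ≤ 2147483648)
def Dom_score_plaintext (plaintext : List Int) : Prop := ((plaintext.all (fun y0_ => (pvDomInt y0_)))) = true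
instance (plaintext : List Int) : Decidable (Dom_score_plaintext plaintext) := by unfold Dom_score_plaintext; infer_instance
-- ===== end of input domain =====

-- B replaces A's per-element scoring loop by a histogram pass plus an aggregation over the
-- distinct codes weighted by their counts (objective: alternative, same O(n) cost).

-- chr(n): exact for the byte codes 0 ≤ n ≤ 255 admitted by Pre_
def pyChr (n : Int) : Char := Char.ofNat n.toNat
-- `chr(char) in common_chars`: single-char substring test = the Python expression both programs share
def isCommonChar (c : Int) : Bool :=
  PySem.Chars.isIn [pyChr c] ("etaoinshrdlu ETAOINSHRDLU".toList)
-- chr(c).isprintable(): exact for 0 ≤ c ≤ 255 (Latin-1 rule; checked against CPython)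
def pyIsPrintableByte (c : Int) : Bool :=
  (32 ≤ c && c ≤ 126) || (161 ≤ c && c ≤ 255 && c != 173)

-- ===== PORT A =====
def score_plaintext (plaintext : List Int) : Int :=
  plaintext.foldl (fun score char =>
    if isCommonChar char then score + 1
    else if !(pyIsPrintableByte char) then score - 10
    else score) 0

-- ===== PORT B =====
def score_plaintext_alt (plaintext : List Int) : Int :=
  let freq : PySem.Dict Int Int :=
    plaintext.foldl (fun d char => d.insert char (d.getD char 0 + 1)) PySem.Dict.empty
  freq.items.foldl (fun score p =>
    if isCommonChar p.1 then score + p.2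
    else if !(pyIsPrintableByte p.1) then score - 10 * p.2
    else score) 0

-- ===== PRECONDITION & SPEC =====
-- Pre_ excludes codes outside [0, 255]: on negatives and codes > 0x10FFFF chr raises ValueError in
-- both programs, and on the codes 256..0x10FFFF (where A returns and B returns the same value)
-- str.isprintable depends on the full Unicode character database, which the Lean model does not
-- carry — it is exact only on the byte range a single-byte XOR cipher produces.
def Pre_score_plaintext (plaintext : List Int) : Prop :=
  ∀ c ∈ plaintext, 0 ≤ c ∧ c ≤ 255
instance (plaintext : List Int) : Decidable (Pre_score_plaintext plaintext) := by
  unfold Pre_score_plaintext; infer_instance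
def pvWitness_score_plaintext : List Int := [101, 88, 7, 32, 200, 173, 101]

def Spec_score_plaintext (plaintext : List Int) (out : Int) : Prop := out = score_plaintext_alt plaintext
instance (plaintext : List Int) (out : Int) : Decidable (Spec_score_plaintext plaintext out) := by unfold Spec_score_plaintext; infer_instance

-- ===== CLAIM (what is proved, stated in full; the proofs are below) =====
def Claim_equal_score_plaintext : Prop := ∀ (plaintext : List Int), Dom_score_plaintext plaintext → Pre_score_plaintext plaintext → Spec_score_plaintext plaintext (score_plaintext plaintext)

-- ===== LEMMAS AND PROOFS =====

-- per-occurrence score of one code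
def pvG (c : Int) : Int :=
  if isCommonChar c then 1 else if !(pyIsPrintableByte c) then -10 else 0

theorem pvFoldA (xs : List Int) (a : Int) :
    xs.foldl (fun score char =>
      if isCommonChar char then score + 1
      else if !(pyIsPrintableByte char) then score - 10
      else score) a = a + (xs.map pvG).sum := by
  induction xs generalizing a with
  | nil => simp
  | cons x xs ih =>
    simp only [List.foldl_cons, List.map_cons, List.sum_cons, ih, pvG]
    split_ifs <;> ring

theorem pvFoldB (l : List (Int × Int)) (a : Int) :
    l.foldl (fun score p =>
      if isCommonChar p.1 then score + p.2
      else if !(pyIsPrintableByte p.1) then score - 10 * p.2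
      else score) a = a + (l.map (fun p => pvG p.1 * p.2)).sum := by
  induction l generalizing a with
  | nil => simp
  | cons x l ih =>
    simp only [List.foldl_cons, List.map_cons, List.sum_cons, ih, pvG]
    split_ifs <;> ring

theorem pvSetToFinset (xs : List Int) :
    (PySem.Set.ofList xs).toFinset = xs.toFinset := by
  ext m
  simp [List.mem_toFinset, PySem.Set.mem_ofList]

theorem pvMain (xs : List Int) :
    ((PySem.Set.ofList xs).map (fun k => pvG k * (xs.count k : Int))).sum
      = (xs.map pvG).sum := by
  rw [← List.sum_toFinset _ (PySem.Set.nodup_ofList xs), pvSetToFinset,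
      Finset.sum_list_map_count]
  refine Finset.sum_congr rfl (fun m _ => ?_)
  simp [mul_comm]

-- ===== VERDICT (by name: the statement is the Claim_ definition above) =====
theorem score_plaintext_spec : Claim_equal_score_plaintext := by
  intro xs _ _
  show score_plaintext xs = score_plaintext_alt xs
  rw [score_plaintext, score_plaintext_alt, pvFoldA,
      PySem.Dict.foldl_insert_getD_add_one_eq_counter, PySem.Dict.items_counter, pvFoldB,
      List.map_map]
  rw [← pvMain xs]
  rfl
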